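-- pv_equiv track=rewrite | github.com/DhetchinaShanmugam/DhetchinaShanmugam | Tic-Tac-Toe game.py | creating_row_column_diagonals
-- ===== SOURCE A (Python) =====
-- def creating_row_column_diagonals(matrix):
--     left_to_right = []
--     right_to_left = []
--     row = []
--     column = []
--     for i in range(3):
--         each_row = []
--         each_column = []
--         left_to_right.append(matrix[i][i])
--         right_to_left.append(matrix[2 - i][i])
--         for j in range(3):
--             each_row.append(matrix[i][j])
--             each_column.append(matrix[j][i])
--         row.append(each_row)
--         column.append(each_column)
--
--     return row, column, right_to_left, left_to_right
-- ===== SOURCE B (Python) =====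
-- def creating_row_column_diagonals(matrix):
--     flat = [matrix[i][j] for i in range(3) for j in range(3)]
--     row = [flat[0:3], flat[3:6], flat[6:9]]
--     column = [flat[0::3], flat[1::3], flat[2::3]]
--     right_to_left = flat[6:1:-2]
--     left_to_right = flat[0::4]
--     return row, column, right_to_left, left_to_right
-- ===== Notes on version B (the rewrite author's own statement) =====
-- stated objective: alternative
-- what changed: Flattens the 3x3 grid into a single 9-element list in one pass and derives all four outputs by stride slicing it (rows flat[0:3]/[3:6]/[6:9], columns flat[k::3], diagonals flat[0::4] and flat[6:1:-2]), replacing A's fused double index loop over four accumulators.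
import Mathlib
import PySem

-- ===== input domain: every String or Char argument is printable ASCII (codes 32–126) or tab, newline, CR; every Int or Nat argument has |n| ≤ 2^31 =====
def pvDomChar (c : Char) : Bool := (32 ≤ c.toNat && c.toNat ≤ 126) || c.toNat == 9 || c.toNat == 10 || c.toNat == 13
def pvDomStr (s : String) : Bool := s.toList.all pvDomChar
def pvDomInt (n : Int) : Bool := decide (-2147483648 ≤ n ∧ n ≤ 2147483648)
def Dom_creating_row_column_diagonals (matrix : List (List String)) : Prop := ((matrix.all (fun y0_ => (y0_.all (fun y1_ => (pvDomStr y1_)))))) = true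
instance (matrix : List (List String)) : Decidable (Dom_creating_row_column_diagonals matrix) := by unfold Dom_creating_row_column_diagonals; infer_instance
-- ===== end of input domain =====

-- B flattens the 3x3 grid into one 9-element list and reads every output off it with
-- stride slices (rows 0:3/3:6/6:9, columns k::3, diagonals 0::4 and 6:1:-2), replacing
-- A's fused double index loop (alternative decomposition; same cost).


-- ===== PORT A =====
-- matrix[i][j] (Python raises IndexError when out of range; Pre_ excludes that, so the
-- default "" / [] is never reached on admitted inputs)
def pvGetA (matrix : List (List String)) (i j : Int) : String :=
  (PySem.List.pyGet? ((PySem.List.pyGet? matrix i).getD []) j).getD ""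

def creating_row_column_diagonals (matrix : List (List String)) : List (List String) × List (List String) × List String × List String :=
  let st := List.foldl (fun (s : List (List String) × List (List String) × List String × List String) (i : Int) =>
    let (row, column, right_to_left, left_to_right) := s
    let left_to_right := left_to_right ++ [pvGetA matrix i i]
    let right_to_left := right_to_left ++ [pvGetA matrix (2 - i) i]
    let inner := List.foldl (fun (p : List String × List String) (j : Int) =>
        (p.1 ++ [pvGetA matrix i j], p.2 ++ [pvGetA matrix j i]))
      ([], []) (PySem.List.pyRange 0 3 1)
    (row ++ [inner.1], column ++ [inner.2], right_to_left, left_to_right))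
    ([], [], [], []) (PySem.List.pyRange 0 3 1)
  (st.1, st.2.1, st.2.2.1, st.2.2.2)

-- ===== PORT B =====
-- matrix[i][j] used while building the flat list (in range under Pre_)
def pvGetB (matrix : List (List String)) (i j : Int) : String :=
  (PySem.List.pyGet? ((PySem.List.pyGet? matrix i).getD []) j).getD ""

def creating_row_column_diagonals_alt (matrix : List (List String)) : List (List String) × List (List String) × List String × List String :=
  let flat := (PySem.List.pyRange 0 3 1).flatMap (fun i =>
    (PySem.List.pyRange 0 3 1).map (fun j => pvGetB matrix i j))
  let row := [PySem.List.slice flat (some 0) (some 3),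
              PySem.List.slice flat (some 3) (some 6),
              PySem.List.slice flat (some 6) (some 9)]
  let column := [(PySem.List.slice? flat (some 0) none 3).getD [],
                 (PySem.List.slice? flat (some 1) none 3).getD [],
                 (PySem.List.slice? flat (some 2) none 3).getD []]
  let right_to_left := (PySem.List.slice? flat (some 6) (some 1) (-2)).getD []
  let left_to_right := (PySem.List.slice? flat (some 0) none 4).getD []
  (row, column, right_to_left, left_to_right)

-- ===== PRECONDITION & SPEC =====
-- Pre_ excludes exactly the inputs on which A raises IndexError: fewer than 3 rows,
-- or one of the first 3 rows shorter than 3.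
def Pre_creating_row_column_diagonals (matrix : List (List String)) : Prop :=
  3 ≤ matrix.length ∧ ∀ r ∈ matrix.take 3, 3 ≤ r.length
instance (matrix : List (List String)) : Decidable (Pre_creating_row_column_diagonals matrix) := by unfold Pre_creating_row_column_diagonals; infer_instance
def pvWitness_creating_row_column_diagonals : List (List String) :=
  [["a","b","c"],["d","e","f"],["g","h","i"]]

def Spec_creating_row_column_diagonals (matrix : List (List String)) (out : List (List String) × List (List String) × List String × List String) : Prop := out = creating_row_column_diagonals_alt matrix
instance (matrix : List (List String)) (out : List (List String) × List (List String) × List String × List String) : Decidable (Spec_creating_row_column_diagonals matrix out) := by unfold Spec_creating_row_column_diagonals; infer_instance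

-- ===== CLAIM (what is proved, stated in full; the proofs are below) =====
def Claim_equal_creating_row_column_diagonals : Prop := ∀ (matrix : List (List String)), Dom_creating_row_column_diagonals matrix → Pre_creating_row_column_diagonals matrix → Spec_creating_row_column_diagonals matrix (creating_row_column_diagonals matrix)

-- ===== LEMMAS AND PROOFS =====
theorem pvPg1 {α : Type} (x0 x1 : α) (xs : List α) : PySem.List.pyGet? (x0 :: x1 :: xs) 1 = some x1 := by
  simp [PySem.List.pyGet?, PySem.List.pyIdx?]

theorem pvPg2 {α : Type} (x0 x1 x2 : α) (xs : List α) : PySem.List.pyGet? (x0 :: x1 :: x2 :: xs) 2 = some x2 := by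
  simp [PySem.List.pyGet?, PySem.List.pyIdx?]
  split
  · rfl
  · omega

-- ===== VERDICT (by name: the statement is the Claim_ definition above) =====
theorem creating_row_column_diagonals_spec : Claim_equal_creating_row_column_diagonals := by
  intro matrix _ hpre
  obtain ⟨hlen, hrows⟩ := hpre
  match matrix, hlen with
  | r0 :: r1 :: r2 :: rest, _ =>
    have h0 : 3 ≤ r0.length := hrows r0 (by simp)
    have h1 : 3 ≤ r1.length := hrows r1 (by simp)
    have h2 : 3 ≤ r2.length := hrows r2 (by simp)
    match r0, h0 with
    | a0 :: a1 :: a2 :: t0, _ =>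
    match r1, h1 with
    | b0 :: b1 :: b2 :: t1, _ =>
    match r2, h2 with
    | c0 :: c1 :: c2 :: t2, _ =>
      show _ = _
      simp [creating_row_column_diagonals, creating_row_column_diagonals_alt,
        pvGetA, pvGetB, PySem.List.pyRange, PySem.List.slice, PySem.List.slice?,
        pvPg1, pvPg2, List.range_succ, PySem.List.sliceIndices, List.filterMap]
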